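-- pv_equiv track=rewrite | github.com/petetindale/AoC_2021 | Submarine/snailfish.py | matchedbrackets
-- ===== SOURCE A (Python) =====
-- def matchedbrackets(brackets:str)->str:
-- 	count = 0
-- 	build = ''
-- 	for char in brackets:
-- 		if char == '[' :
-- 			count += 1
-- 		elif char == ']':
-- 			count -= 1
-- 		build += char
-- 		if count==0 :
-- 			return build
-- 	return ''
-- ===== SOURCE B (Python) =====
-- def matchedbrackets(brackets: str) -> str:
--     # Two-pass: build the prefix-sum table of bracket depths, then scan it for the first zero.
--     deltas = [1 if c == '[' else -1 if c == ']' else 0 for c in brackets]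
--     cum = []
--     total = 0
--     for d in deltas:
--         total += d
--         cum.append(total)
--     for i, s in enumerate(cum):
--         if s == 0:
--             return brackets[:i + 1]
--     return ''
-- ===== Notes on version B (the rewrite author's own statement) =====
-- stated objective: alternative
-- what changed: B first builds a prefix-sum table of per-character depth deltas, then scans that table for the first zero and slices the string, instead of A's single inline loop that accumulates a counter and the output string together.
import Mathlib
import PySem

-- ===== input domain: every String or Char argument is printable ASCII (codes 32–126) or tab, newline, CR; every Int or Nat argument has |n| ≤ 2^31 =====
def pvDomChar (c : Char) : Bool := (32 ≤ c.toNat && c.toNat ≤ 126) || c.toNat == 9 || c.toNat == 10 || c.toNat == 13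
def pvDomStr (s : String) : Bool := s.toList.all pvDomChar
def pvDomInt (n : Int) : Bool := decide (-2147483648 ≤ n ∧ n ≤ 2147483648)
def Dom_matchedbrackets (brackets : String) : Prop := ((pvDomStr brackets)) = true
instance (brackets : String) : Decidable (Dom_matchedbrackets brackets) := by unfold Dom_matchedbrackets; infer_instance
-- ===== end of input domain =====

-- B replaces A's single accumulating loop by a prefix-sum table built first and then scanned for the first zero (alternative decomposition).


-- ===== PORT A =====
-- A's loop: count tracks the bracket depth, build the prefix built so far.
def pvLoopA : List Char → Int → String → String
  | [], _, _ => ""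
  | c :: cs, count, build =>
    let count' := if c = '[' then count + 1 else if c = ']' then count - 1 else count
    let build' := build.push c
    if count' = 0 then build' else pvLoopA cs count' build'

def matchedbrackets (brackets : String) : String :=
  pvLoopA brackets.toList 0 ""

-- ===== PORT B =====
-- Source B: per-character depth delta
def pvDelta (c : Char) : Int := if c = '[' then 1 else if c = ']' then -1 else 0

-- Source B: running-total pass building the cum table
def pvAccum (total : Int) : List Int → List Int
  | [] => []
  | d :: ds => (total + d) :: pvAccum (total + d) ds

-- Source B: enumerate scan over cum for the first zero; returns brackets[:i+1]
def pvSearch (chars : List Char) (i : Nat) : List Int → String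
  | [] => ""
  | s :: ss => if s = 0 then String.ofList (chars.take (i + 1)) else pvSearch chars (i + 1) ss

def matchedbrackets_alt (brackets : String) : String :=
  pvSearch brackets.toList 0 (pvAccum 0 (brackets.toList.map pvDelta))

-- ===== PRECONDITION & SPEC =====
def Spec_matchedbrackets (brackets : String) (out : String) : Prop := out = matchedbrackets_alt brackets
instance (brackets : String) (out : String) : Decidable (Spec_matchedbrackets brackets out) := by unfold Spec_matchedbrackets; infer_instance

-- ===== CLAIM (what is proved, stated in full; the proofs are below) =====
def Claim_equal_matchedbrackets : Prop := ∀ (brackets : String), Dom_matchedbrackets brackets → Spec_matchedbrackets brackets (matchedbrackets brackets)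

-- ===== LEMMAS AND PROOFS =====

theorem pvKey : ∀ (cs : List Char) (count : Int) (pre : List Char),
    pvLoopA cs count (String.ofList pre)
      = pvSearch (pre ++ cs) pre.length (pvAccum count (cs.map pvDelta)) := by
  intro cs
  induction cs with
  | nil => intro count pre; simp [pvLoopA, pvAccum, pvSearch]
  | cons c cs ih =>
    intro count pre
    have hcount : (if c = '[' then count + 1 else if c = ']' then count - 1 else count)
        = count + pvDelta c := by
      simp only [pvDelta]; split_ifs <;> omega
    have htake : (pre ++ c :: cs).take (pre.length + 1) = pre ++ [c] := by
      simp [List.take_append]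
    have hpush : (String.ofList pre).push c = String.ofList (pre ++ [c]) := by
      apply String.toList_inj.mp; simp
    simp only [pvLoopA, List.map, pvAccum, pvSearch, hcount, htake, hpush]
    by_cases h : count + pvDelta c = 0
    · simp [h]
    · simp only [h, if_false]
      have := ih (count + pvDelta c) (pre ++ [c])
      simpa [List.append_assoc] using this

-- ===== VERDICT (by name: the statement is the Claim_ definition above) =====
theorem matchedbrackets_spec : Claim_equal_matchedbrackets := by
  intro brackets _
  unfold Spec_matchedbrackets matchedbrackets matchedbrackets_alt
  have := pvKey brackets.toList 0 []
  simpa using this
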